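-- pv_equiv track=rewrite | github.com/Mustafa-Ezzat/adventofcode | 2024/D09/main.py | find_leftmost_space
-- ===== SOURCE A (Python) =====
-- def find_leftmost_space(disk, size):
--     free_start = None
--     free_count = 0
--     for i, block in enumerate(disk):
--         if block == '.':
--             if free_start is None:
--                 free_start = i
--             free_count += 1
--             if free_count == size:
--                 return free_start
--         else:
--             free_start = None
--             free_count = 0
--     return None
-- ===== SOURCE B (Python) =====
-- def find_leftmost_space(disk, size):
--     # Two-stage: collect the dot positions once, then slide a window of
--     # `size` over that index list; a window is one free run exactly when
--     # its last index is size-1 past its first.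
--     if size < 1:
--         return None
--     dots = [i for i, b in enumerate(disk) if b == '.']
--     for lo, hi in zip(dots, dots[size - 1:]):
--         if hi - lo == size - 1:
--             return lo
--     return None
-- ===== Notes on version B (the rewrite author's own statement) =====
-- stated objective: alternative
-- what changed: B first extracts the list of '.' positions, then slides a size-wide window over that index list (zip of the list with its shifted self), returning the first window whose endpoints are exactly size-1 apart, instead of A's single pass with a per-block run counter that resets on non-dots.
import Mathlib
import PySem

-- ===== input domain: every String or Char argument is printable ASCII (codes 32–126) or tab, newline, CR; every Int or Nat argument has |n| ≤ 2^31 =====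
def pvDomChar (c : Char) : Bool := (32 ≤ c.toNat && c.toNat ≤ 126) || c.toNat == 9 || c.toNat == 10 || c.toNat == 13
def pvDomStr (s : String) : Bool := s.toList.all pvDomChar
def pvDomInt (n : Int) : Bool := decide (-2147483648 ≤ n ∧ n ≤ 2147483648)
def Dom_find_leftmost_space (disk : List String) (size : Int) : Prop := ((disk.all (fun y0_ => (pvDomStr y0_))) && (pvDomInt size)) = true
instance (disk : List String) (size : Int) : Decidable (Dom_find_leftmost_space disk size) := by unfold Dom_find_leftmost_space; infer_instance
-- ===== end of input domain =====

-- B collects the '.' positions once and slides a size-wide window over that index list (zip with its shifted self), instead of A's per-block run counter with reset; same O(n) cost, a different decomposition.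


-- ===== PORT A =====
-- A's loop: state (free_start, free_count), index i; early return when free_count == size.
def goA : List String → Int → Option Int → Int → Int → Option Int
  | [], _, _, _, _ => none
  | block :: rest, size, free_start, free_count, i =>
    if block = "." then
      let fs := match free_start with
        | none => i
        | some s => s
      let fc := free_count + 1
      if fc = size then some fs
      else goA rest size (some fs) fc (i + 1)
    else
      goA rest size none 0 (i + 1)

def find_leftmost_space (disk : List String) (size : Int) : Option Int :=
  goA disk size none 0 0

-- ===== PORT B =====
-- [i for i, b in enumerate(disk) if b == '.']  (i is the enumerate counter)
def dotsFrom : List String → Int → List Int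
  | [], _ => []
  | b :: rest, i => if b = "." then i :: dotsFrom rest (i + 1) else dotsFrom rest (i + 1)

-- the 'for lo, hi in zip(...)' loop with its early return
def scanZ (size : Int) : List (Int × Int) → Option Int
  | [] => none
  | (lo, hi) :: rest => if hi - lo = size - 1 then some lo else scanZ size rest

def find_leftmost_space_alt (disk : List String) (size : Int) : Option Int :=
  if size < 1 then none
  else
    let dots := dotsFrom disk 0
    -- dots[size - 1:] : since size ≥ 1 here, the slice is exactly List.drop (size-1).toNat
    scanZ size (dots.zip (dots.drop (size - 1).toNat))

-- ===== PRECONDITION & SPEC =====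
def Spec_find_leftmost_space (disk : List String) (size : Int) (out : Option Int) : Prop := out = find_leftmost_space_alt disk size
instance (disk : List String) (size : Int) (out : Option Int) : Decidable (Spec_find_leftmost_space disk size out) := by unfold Spec_find_leftmost_space; infer_instance

-- ===== CLAIM (what is proved, stated in full; the proofs are below) =====
def Claim_equal_find_leftmost_space : Prop := ∀ (disk : List String) (size : Int), Dom_find_leftmost_space disk size → Spec_find_leftmost_space disk size (find_leftmost_space disk size)

-- ===== LEMMAS AND PROOFS =====

-- length of the leading run of "." blocks (proof-side helper)
def dotRun : List String → Nat
  | [] => 0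
  | b :: rest => if b = "." then dotRun rest + 1 else 0

-- common intermediate: scan positions, returning i at the first position whose leading dot-run has length ≥ n+1
def F (n : Nat) : List String → Int → Option Int
  | [], _ => none
  | b :: rest, i => if n + 1 ≤ dotRun (b :: rest) then some i else F n rest (i + 1)

-- abbreviation for B's window scan over a dot-position list (window length n+1)
def S (n : Nat) (d : List Int) : Option Int := scanZ ((n : Int) + 1) (d.zip (d.drop n))

-- A never returns when size ≤ 0: the counter is always ≥ 1 when tested.
theorem goA_nonpos (size : Int) (hs : size ≤ 0) :
    ∀ (ds : List String) (fs : Option Int) (c i : Int), 0 ≤ c → goA ds size fs c i = none := by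
  intro ds
  induction ds with
  | nil => intro fs c i _; rfl
  | cons b rest ih =>
    intro fs c i hc
    by_cases hb : b = "."
    · simp only [goA, hb, if_true]
      have : ¬ (c + 1 = size) := by omega
      simp only [this, if_false]
      exact ih _ _ _ (by omega)
    · simp only [goA, if_neg hb]
      exact ih _ _ _ (by omega)

-- Inside a run of dots with counter c (0 < c < size) and remembered start s,
-- A either finishes inside the run (returning s) or resumes fresh after the run.
theorem goA_run (size : Int) (ds : List String) :
    ∀ (s c i : Int), 0 < c → c < size →
    goA ds size (some s) c i =
      if size ≤ c + (dotRun ds : Int) then some s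
      else goA (ds.drop (dotRun ds)) size none 0 (i + (dotRun ds : Int)) := by
  induction ds with
  | nil =>
    intro s c i _ hlt
    simp only [dotRun, List.drop]
    rw [if_neg (by push_cast; omega)]
    rfl
  | cons b rest ih =>
    intro s c i hc hlt
    by_cases hb : b = "."
    · subst hb
      simp only [goA, dotRun, if_true, List.drop_succ_cons]
      by_cases heq : c + 1 = size
      · rw [if_pos heq, if_pos (by push_cast; omega)]
      · rw [if_neg heq, ih s (c + 1) (i + 1) (by omega) (by omega)]
        by_cases hle : size ≤ c + 1 + (dotRun rest : Int)
        · rw [if_pos hle, if_pos (by push_cast; omega)]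
        · rw [if_neg hle, if_neg (by push_cast; omega)]
          congr 1
          push_cast
          ring
    · simp only [dotRun, if_neg hb, Nat.cast_zero, add_zero, List.drop_zero]
      rw [if_neg (by omega)]
      have hL : goA (b :: rest) size (some s) c i = goA rest size none 0 (i + 1) := by
        simp only [goA, if_neg hb]
      have hR : goA (b :: rest) size none 0 i = goA rest size none 0 (i + 1) := by
        simp only [goA, if_neg hb]
      rw [hL, hR]

-- F skips a too-short leading run in one go.
theorem F_skip (n : Nat) : ∀ (ds : List String) (i : Int), dotRun ds ≤ n →
    F n ds i = F n (ds.drop (dotRun ds)) (i + (dotRun ds : Int)) := by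
  intro ds
  induction ds with
  | nil => intro i _; simp [dotRun, F]
  | cons b rest ih =>
    intro i hle
    by_cases hb : b = "."
    · have hd : dotRun (b :: rest) = dotRun rest + 1 := by simp [dotRun, hb]
      rw [hd] at hle ⊢
      rw [F, if_neg (by rw [hd]; omega), ih (i + 1) (by omega)]
      simp only [List.drop_succ_cons]
      congr 1
      push_cast
      ring
    · have hd : dotRun (b :: rest) = 0 := by simp [dotRun, hb]
      rw [hd]
      simp

-- A (fresh state) equals F, for size = n+1.
theorem goA_eq_F (n : Nat) :
    ∀ (N : Nat) (ds : List String), ds.length ≤ N → ∀ (i : Int),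
    goA ds ((n : Int) + 1) none 0 i = F n ds i := by
  intro N
  induction N with
  | zero =>
    intro ds hlen i
    have : ds = [] := List.eq_nil_of_length_eq_zero (by omega)
    subst this; simp [goA, F]
  | succ N ih =>
    intro ds hlen i
    cases ds with
    | nil => simp [goA, F]
    | cons b rest =>
      by_cases hb : b = "."
      · subst hb
        have hd : dotRun ("." :: rest) = dotRun rest + 1 := by simp [dotRun]
        rw [goA]
        simp only [if_true, zero_add]
        by_cases h1 : (0 : Int) + 1 = (n : Int) + 1
        · have hn : n = 0 := by omega
          subst hn
          rw [if_pos (by omega)]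
          rw [F, hd, if_pos (by omega)]
        · rw [if_neg (by omega), goA_run ((n : Int) + 1) rest i 1 (i + 1) (by omega) (by omega)]
          by_cases hle : (n : Int) + 1 ≤ 1 + (dotRun rest : Int)
          · rw [if_pos hle, F, hd, if_pos (by omega)]
          · rw [if_neg hle, F, hd, if_neg (by omega)]
            rw [F_skip n rest (i + 1) (by omega)]
            rw [ih (rest.drop (dotRun rest)) (by simp [List.length_drop] at hlen ⊢; omega)]
      · rw [goA, if_neg hb, F, if_neg (by simp [dotRun, hb]), ih rest (by simp at hlen; omega)]

-- every entry of dotsFrom is at least start + position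
theorem dotsFrom_lb : ∀ (es : List String) (j : Int) (m : Nat) (x : Int),
    (dotsFrom es j)[m]? = some x → j + m ≤ x := by
  intro es
  induction es with
  | nil => intro j m x h; simp [dotsFrom] at h
  | cons b rest ih =>
    intro j m x h
    by_cases hb : b = "."
    · rw [dotsFrom, if_pos hb] at h
      cases m with
      | zero => simp at h; omega
      | succ m =>
        simp only [List.getElem?_cons_succ] at h
        have := ih (j + 1) m x h
        push_cast
        omega
    · rw [dotsFrom, if_neg hb] at h
      have := ih (j + 1) m x h
      push_cast at this ⊢
      omega

-- within the leading run, dotsFrom entries are consecutive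
theorem dotsFrom_run : ∀ (es : List String) (j : Int) (m : Nat), m < dotRun es →
    (dotsFrom es j)[m]? = some (j + m) := by
  intro es
  induction es with
  | nil => intro j m h; simp [dotRun] at h
  | cons b rest ih =>
    intro j m h
    by_cases hb : b = "."
    · rw [dotsFrom, if_pos hb]
      cases m with
      | zero => simp
      | succ m =>
        have hd : dotRun (b :: rest) = dotRun rest + 1 := by simp [dotRun, hb]
        rw [hd] at h
        simp only [List.getElem?_cons_succ]
        rw [ih (j + 1) m (by omega)]
        congr 1
        push_cast
        ring
    · have : dotRun (b :: rest) = 0 := by simp [dotRun, hb]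
      omega

-- past a too-short leading run, the entry stands strictly beyond consecutive
theorem dotsFrom_gap : ∀ (es : List String) (j : Int) (m : Nat) (x : Int), dotRun es ≤ m →
    (dotsFrom es j)[m]? = some x → j + m + 1 ≤ x := by
  intro es
  induction es with
  | nil => intro j m x _ h; simp [dotsFrom] at h
  | cons b rest ih =>
    intro j m x hle h
    by_cases hb : b = "."
    · have hd : dotRun (b :: rest) = dotRun rest + 1 := by simp [dotRun, hb]
      rw [hd] at hle
      rw [dotsFrom, if_pos hb] at h
      cases m with
      | zero => omega
      | succ m =>
        simp only [List.getElem?_cons_succ] at h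
        have := ih (j + 1) m x (by omega) h
        push_cast at this ⊢
        omega
    · rw [dotsFrom, if_neg hb] at h
      have := dotsFrom_lb rest (j + 1) m x h
      push_cast at this ⊢
      omega

-- recursion shapes of the window scan
theorem S_cons_none (n : Nat) (x : Int) (d : List Int) (h : (x :: d)[n]? = none) :
    S n (x :: d) = none := by
  unfold S
  have hlen : (x :: d).length ≤ n := by
    have := List.getElem?_eq_none_iff.mp h
    omega
  rw [List.drop_eq_nil_iff.mpr hlen]
  simp [List.zip_nil_right, scanZ]

theorem S_cons_some (n : Nat) (x hv : Int) (d : List Int) (h : (x :: d)[n]? = some hv) :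
    S n (x :: d) = if hv - x = (n : Int) then some x else S n d := by
  unfold S
  have hlt : n < (x :: d).length := by
    by_contra hcon
    rw [List.getElem?_eq_none_iff.mpr (by omega)] at h
    simp at h
  have hget : (x :: d)[n] = hv := by
    have := List.getElem?_eq_getElem hlt
    rw [h] at this
    exact (Option.some_inj.mp this).symm
  have hdrop : (x :: d).drop n = hv :: (x :: d).drop (n + 1) := by
    rw [List.drop_eq_getElem_cons hlt, hget]
  rw [hdrop, List.drop_succ_cons]
  simp only [List.zip_cons_cons, scanZ]
  have hone : (n : Int) + 1 - 1 = (n : Int) := by ring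
  rw [hone]

-- F equals B's window scan over the dot positions.
theorem F_eq_S (n : Nat) : ∀ (ds : List String) (i : Int),
    F n ds i = S n (dotsFrom ds i) := by
  intro ds
  induction ds with
  | nil => intro i; simp [F, dotsFrom, S, scanZ]
  | cons b rest ih =>
    intro i
    by_cases hb : b = "."
    · have hd : dotRun (b :: rest) = dotRun rest + 1 := by simp [dotRun, hb]
      rw [dotsFrom, if_pos hb]
      cases n with
      | zero =>
        rw [S_cons_some 0 i i (dotsFrom rest (i + 1)) (by simp)]
        rw [F, hd, if_pos (by omega)]
        simp
      | succ m =>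
        cases hx : (dotsFrom rest (i + 1))[m]? with
        | none =>
          have hrun : dotRun rest ≤ m := by
            by_contra hcon
            rw [dotsFrom_run rest (i + 1) m (by omega)] at hx
            simp at hx
          rw [S_cons_none (m + 1) i (dotsFrom rest (i + 1)) (by simpa using hx)]
          rw [F, hd, if_neg (by omega), ih (i + 1)]
          have hlen : (dotsFrom rest (i + 1)).length ≤ m := List.getElem?_eq_none_iff.mp hx
          unfold S
          rw [List.drop_eq_nil_iff.mpr (by omega)]
          simp [List.zip_nil_right, scanZ]
        | some x =>
          rw [S_cons_some (m + 1) i x (dotsFrom rest (i + 1)) (by simpa using hx)]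
          by_cases hrun : m + 1 ≤ dotRun rest
          · have hv := dotsFrom_run rest (i + 1) m (by omega)
            rw [hx] at hv
            have hxv : x = i + 1 + m := Option.some_inj.mp hv
            rw [if_pos (by push_cast; omega)]
            rw [F, hd, if_pos (by omega)]
          · have hgt := dotsFrom_gap rest (i + 1) m x (by omega) hx
            rw [if_neg (by push_cast; omega)]
            rw [F, hd, if_neg (by omega), ih (i + 1)]
    · rw [dotsFrom, if_neg hb, F, if_neg (by simp [dotRun, hb]), ih (i + 1)]

-- ===== VERDICT (by name: the statement is the Claim_ definition above) =====
theorem find_leftmost_space_spec : Claim_equal_find_leftmost_space := by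
  intro disk size _
  unfold Spec_find_leftmost_space find_leftmost_space find_leftmost_space_alt
  by_cases hs : size < 1
  · rw [if_pos hs]
    exact goA_nonpos size (by omega) disk none 0 0 le_rfl
  · rw [if_neg hs]
    set n : Nat := (size - 1).toNat with hn
    have hsz : size = (n : Int) + 1 := by omega
    rw [hsz]
    show goA disk ((n : Int) + 1) none 0 0 =
      scanZ ((n : Int) + 1) ((dotsFrom disk 0).zip (List.drop n (dotsFrom disk 0)))
    rw [goA_eq_F n disk.length disk le_rfl 0, F_eq_S n disk 0]
    rfl
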